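-- pv_equiv track=rewrite | github.com/oracle/oci-go-sdk | scripts/auto_gen_utils/team_city_scripts/oci_testing_service/report_test_results.py | get_just_stack_trace
-- ===== SOURCE A (Python) =====
-- def get_just_stack_trace(message):
--     text = ""
--     skip = True
--
--     for line in message.split("\n"):
--         if text and not skip:
--             text = text + "\n"
--
--         if line.startswith("\tat "):
--             skip = False
--
--         if not skip:
--             text = text + line
--
--     return text.strip()
-- ===== SOURCE B (Python) =====
-- def get_just_stack_trace(message):
--     if message.startswith("\tat "):
--         return message.strip()
--     idx = message.find("\n\tat ")
--     if idx == -1: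
--         return ""
--     return message[idx + 1:].strip()
-- ===== Notes on version B (the rewrite author's own statement) =====
-- stated objective: alternative
-- what changed: A splits the message into lines and accumulates the kept suffix line by line with a skip flag and repeated concatenation; B never splits: it searches the raw string once for the first newline-preceded stack-trace marker (or a marker prefix at the very start) and returns a single stripped slice from that point.
import Mathlib
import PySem

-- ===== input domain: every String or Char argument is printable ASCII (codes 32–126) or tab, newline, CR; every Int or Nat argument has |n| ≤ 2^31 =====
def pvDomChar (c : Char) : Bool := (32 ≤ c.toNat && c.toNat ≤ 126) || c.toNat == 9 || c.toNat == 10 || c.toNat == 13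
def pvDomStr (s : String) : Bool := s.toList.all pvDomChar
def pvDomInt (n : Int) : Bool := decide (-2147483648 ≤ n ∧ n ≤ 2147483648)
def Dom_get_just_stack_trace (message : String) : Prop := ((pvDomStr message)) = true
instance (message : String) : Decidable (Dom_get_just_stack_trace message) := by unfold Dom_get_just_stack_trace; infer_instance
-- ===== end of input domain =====

/- B replaces A's line-splitting accumulation loop by a direct substring search ("\n\tat ")
   and one slice of the raw string (alternative algorithm, same return value). -/


-- ===== PORT A =====
-- one loop step of A: text/skip state, 'if text and not skip', marker test, conditional append
def pvStepA (st : List Char × Bool) (line : List Char) : List Char × Bool :=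
  let text := if st.1 ≠ [] ∧ st.2 = false then st.1 ++ ['\n'] else st.1
  let skip := if PySem.Chars.startswith line ['\t', 'a', 't', ' '] then false else st.2
  let text := if skip = false then text ++ line else text
  (text, skip)

def get_just_stack_trace (message : String) : String :=
  let r := (PySem.Chars.splitOn message.toList ['\n']).foldl pvStepA ([], true)
  String.ofList (PySem.Chars.strip r.1)

-- ===== PORT B =====
def get_just_stack_trace_alt (message : String) : String :=
  let cs := message.toList
  if PySem.Chars.startswith cs ['\t', 'a', 't', ' '] then
    String.ofList (PySem.Chars.strip cs)
  else
    let idx := PySem.Chars.find cs ['\n', '\t', 'a', 't', ' ']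
    if idx = -1 then ""
    else String.ofList (PySem.Chars.strip (cs.drop (idx.toNat + 1)))

-- ===== PRECONDITION & SPEC =====
def Spec_get_just_stack_trace (message : String) (out : String) : Prop := out = get_just_stack_trace_alt message
instance (message : String) (out : String) : Decidable (Spec_get_just_stack_trace message out) := by unfold Spec_get_just_stack_trace; infer_instance

-- ===== CLAIM (what is proved, stated in full; the proofs are below) =====
def Claim_equal_get_just_stack_trace : Prop := ∀ (message : String), Dom_get_just_stack_trace message → Spec_get_just_stack_trace message (get_just_stack_trace message)

-- ===== LEMMAS AND PROOFS =====

-- the "\tat " marker and the "\n\tat " search pattern, named for the lemmas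
def pvTat : List Char := ['\t', 'a', 't', ' ']
def pvNlt : List Char := ['\n', '\t', 'a', 't', ' ']

-- pure recursive model of message.split("\n")
def mySplit : List Char → List (List Char)
  | [] => [[]]
  | c :: cs => if c = '\n' then [] :: mySplit cs else (mySplit cs).modifyHead (c :: ·)

-- '\n'.join on the line list
def joinLines : List (List Char) → List Char
  | [] => []
  | l :: ls => l ++ (ls.map ('\n' :: ·)).flatten

-- the line suffix A keeps, joined back with '\n'
def pvSeg (cs : List Char) : List Char :=
  joinLines ((mySplit cs).dropWhile (fun l => !PySem.Chars.startswith l pvTat))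

theorem modifyHead_fun_id {α : Type} (l : List α) : l.modifyHead (fun x => x) = l := by
  cases l <;> simp

theorem mySplit_ne_nil (cs : List Char) : mySplit cs ≠ [] := by
  induction cs with
  | nil => simp [mySplit]
  | cons c cs ih =>
    simp only [mySplit]
    split
    · simp
    · cases h : mySplit cs with
      | nil => exact absurd h ih
      | cons a as => simp

theorem go_spec : ∀ (fuel : Nat) (l cur : List Char) (acc : List (List Char)),
    l.length < fuel →
    PySem.Chars.splitOn.go ['\n'] fuel l cur acc
      = acc.reverse ++ (mySplit l).modifyHead (cur.reverse ++ ·) := by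
  intro fuel
  induction fuel with
  | zero => intro l cur acc h; omega
  | succ n ih =>
    intro l cur acc h
    cases l with
    | nil => simp [PySem.Chars.splitOn.go, mySplit]
    | cons c rest =>
      by_cases hc : c = '\n'
      · subst hc
        rw [PySem.Chars.splitOn.go]
        rw [if_pos (by simp [List.isPrefixOf])]
        simp only [List.length_cons, List.length_nil, List.drop_succ_cons, List.drop_zero]
        rw [ih rest [] (cur.reverse :: acc) (by simp at h ⊢; omega)]
        simp [mySplit, modifyHead_fun_id]
      · rw [PySem.Chars.splitOn.go]
        rw [if_neg (by simp [List.isPrefixOf]; exact fun hh => absurd hh.symm hc)]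
        rw [ih rest (c :: cur) acc (by simp at h ⊢; omega)]
        simp only [mySplit, if_neg hc]
        cases hms : mySplit rest with
        | nil => exact absurd hms (mySplit_ne_nil rest)
        | cons a as => simp

theorem splitOn_eq_mySplit (cs : List Char) :
    PySem.Chars.splitOn cs ['\n'] = mySplit cs := by
  rw [PySem.Chars.splitOn, go_spec (cs.length + 1) cs [] [] (by omega)]
  cases hms : mySplit cs with
  | nil => exact absurd hms (mySplit_ne_nil cs)
  | cons a as => simp

theorem joinLines_mySplit (cs : List Char) : joinLines (mySplit cs) = cs := by
  induction cs with
  | nil => simp [mySplit, joinLines]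
  | cons c cs ih =>
    simp only [mySplit]
    cases h : mySplit cs with
    | nil => exact absurd h (mySplit_ne_nil cs)
    | cons a as =>
      rw [h] at ih
      split
      · rename_i hc; subst hc
        simp [joinLines] at ih ⊢
        simpa using ih
      · simp [joinLines] at ih ⊢
        simpa using ih

theorem mySplit_no_nl (cs : List Char) (h : '\n' ∉ cs) : mySplit cs = [cs] := by
  induction cs with
  | nil => simp [mySplit]
  | cons c cs ih =>
    simp only [List.mem_cons, not_or] at h
    simp [mySplit, Ne.symm h.1, ih h.2]

theorem mySplit_append (l rest : List Char) (hl : '\n' ∉ l) :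
    mySplit (l ++ '\n' :: rest) = l :: mySplit rest := by
  induction l with
  | nil => simp [mySplit]
  | cons c l ih =>
    simp only [List.mem_cons, not_or] at hl
    simp [mySplit, Ne.symm hl.1, ih hl.2]

-- A's fold: accumulation phase (text stays nonempty, skip stays off)
theorem foldl_accum (ls : List (List Char)) :
    ∀ t : List Char, t ≠ [] →
    ls.foldl pvStepA (t, false) = (t ++ (ls.map ('\n' :: ·)).flatten, false) := by
  induction ls with
  | nil => intro t ht; simp
  | cons l ls ih =>
    intro t ht
    have hstep : pvStepA (t, false) l = (t ++ '\n' :: l, false) := by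
      simp [pvStepA, ht]
    simp only [List.foldl_cons, hstep]
    rw [ih (t ++ '\n' :: l) (by simp)]
    simp

theorem startswith_ne_nil (l : List Char) (h : PySem.Chars.startswith l pvTat = true) :
    l ≠ [] := by
  intro hnil; subst hnil
  simp [PySem.Chars.startswith, pvTat] at h

-- A's fold: skip phase, then handover to the accumulation phase at the first marker line
theorem foldl_skip (ls : List (List Char)) :
    (ls.foldl pvStepA ([], true)).1
      = joinLines (ls.dropWhile (fun l => !PySem.Chars.startswith l pvTat)) := by
  induction ls with
  | nil => simp [joinLines]
  | cons l ls ih =>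
    by_cases hp : PySem.Chars.startswith l pvTat = true
    · have hstep : pvStepA ([], true) l = (l, false) := by
        simp [pvStepA, pvTat] at hp ⊢
        simp [hp]
      simp only [List.foldl_cons, hstep]
      rw [foldl_accum ls l (startswith_ne_nil l hp)]
      simp [hp, joinLines]
    · have hstep : pvStepA ([], true) l = ([], true) := by
        simp [pvStepA, pvTat] at hp ⊢
        simp [hp]
      simp only [List.foldl_cons, hstep]
      rw [ih]
      simp [hp]

-- "\tat " is a prefix of l ++ '\n' :: rest iff it is a prefix of l ("\tat " has no newline)
theorem tat_prefix_append (l rest : List Char) :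
    pvTat <+: (l ++ '\n' :: rest) ↔ pvTat <+: l := by
  match l with
  | [] => simp [pvTat, List.cons_prefix_cons]
  | [a] => simp [pvTat, List.cons_prefix_cons]
  | [a, b] => simp [pvTat, List.cons_prefix_cons]
  | [a, b, c] => simp [pvTat, List.cons_prefix_cons]
  | a :: b :: c :: d :: l' => simp [pvTat, List.cons_prefix_cons]

theorem find_go_ge (sub : List Char) :
    ∀ (l : List Char) (k : Nat), -1 ≤ PySem.Chars.find.go sub l k := by
  intro l
  induction l with
  | nil => intro k; rw [PySem.Chars.find.go]; split <;> omega
  | cons c t ih => intro k; rw [PySem.Chars.find.go]; split; · omega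
                   · exact ih (k + 1)

theorem find_go_shift (sub : List Char) :
    ∀ (l : List Char) (k : Nat), PySem.Chars.find.go sub l k
      = if PySem.Chars.find.go sub l 0 = -1 then -1 else PySem.Chars.find.go sub l 0 + k := by
  intro l
  induction l with
  | nil =>
    intro k
    have h0 : PySem.Chars.find.go sub [] 0 = if sub.isEmpty then (0:Int) else -1 := by
      rw [PySem.Chars.find.go]; simp
    rw [PySem.Chars.find.go, h0]
    split <;> simp
  | cons c t ih =>
    intro k
    have h0 : PySem.Chars.find.go sub (c :: t) 0
        = if sub.isPrefixOf (c :: t) then (0:Int) else PySem.Chars.find.go sub t 1 := by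
      rw [PySem.Chars.find.go]; simp
    rw [PySem.Chars.find.go, h0]
    by_cases hp : sub.isPrefixOf (c :: t) = true
    · simp [hp]
    · rw [if_neg hp, if_neg hp, ih (k + 1), ih 1]
      by_cases hq : PySem.Chars.find.go sub t 0 = -1
      · simp [hq]
      · have hge := find_go_ge sub t 0
        rw [if_neg hq, if_neg hq, if_neg (by omega)]
        push_cast; ring

theorem find_cons (c : Char) (l sub : List Char) :
    PySem.Chars.find (c :: l) sub
      = if sub.isPrefixOf (c :: l) then 0
        else if PySem.Chars.find l sub = -1 then -1 else PySem.Chars.find l sub + 1 := by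
  rw [PySem.Chars.find, PySem.Chars.find.go]
  by_cases hp : sub.isPrefixOf (c :: l) = true
  · simp [hp]
  · rw [if_neg (by simp [hp]), if_neg (by simp [hp])]
    rw [find_go_shift sub l 1, PySem.Chars.find]
    split <;> simp

-- where "\n\tat " first occurs in l ++ '\n' :: rest, in terms of rest ('\n' not in l)
theorem find_nlt_append (l rest : List Char) (hl : '\n' ∉ l) :
    PySem.Chars.find (l ++ '\n' :: rest) pvNlt
      = if pvTat.isPrefixOf rest then (l.length : Int)
        else if PySem.Chars.find rest pvNlt = -1 then -1
        else PySem.Chars.find rest pvNlt + l.length + 1 := by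
  induction l with
  | nil =>
    rw [List.nil_append, find_cons]
    have : pvNlt.isPrefixOf ('\n' :: rest) = pvTat.isPrefixOf rest := by
      simp [pvNlt, pvTat]
    rw [this]
    split
    · simp
    · split <;> simp
  | cons c l ih =>
    simp only [List.mem_cons, not_or] at hl
    rw [List.cons_append, find_cons]
    have hnp : pvNlt.isPrefixOf (c :: (l ++ '\n' :: rest)) = false := by
      have hc : ('\n' == c) = false := by
        simp only [beq_eq_false_iff_ne, ne_eq]; exact hl.1
      simp [pvNlt, List.isPrefixOf, hc]
    rw [hnp, if_neg (by simp), ih hl.2]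
    by_cases ht : pvTat.isPrefixOf rest = true
    · rw [if_pos ht, if_pos ht]
      have hlen : ((l.length : Int)) ≥ 0 := by positivity
      rw [if_neg (by omega)]
      simp only [List.length_cons]; push_cast; ring
    · simp only [ht, Bool.false_eq_true, if_false]
      by_cases hf : PySem.Chars.find rest pvNlt = -1
      · simp [hf]
      · have hge : (0:Int) ≤ PySem.Chars.find rest pvNlt := by
          have := find_go_ge pvNlt rest 0
          rw [PySem.Chars.find] at hf ⊢; omega
        rw [if_neg hf, if_neg hf, if_neg (by omega)]
        simp only [List.length_cons]; push_cast; ring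

-- if the message itself starts with "\tat ", A keeps every line: the join is the message
theorem seg_of_startswith (cs : List Char)
    (h : PySem.Chars.startswith cs pvTat = true) : pvSeg cs = cs := by
  obtain ⟨t, rfl⟩ : ∃ t, cs = pvTat ++ t := by
    have h' : pvTat <+: cs := by
      simpa [PySem.Chars.startswith, List.isPrefixOf_iff_prefix] using h
    obtain ⟨t, ht⟩ := h'
    exact ⟨t, ht.symm⟩
  unfold pvSeg
  cases hms : mySplit t with
  | nil => exact absurd hms (mySplit_ne_nil t)
  | cons a as =>
    have hsp : mySplit (pvTat ++ t) = ('\t' :: 'a' :: 't' :: ' ' :: a) :: as := by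
      simp [pvTat, mySplit, hms]
    rw [hsp, List.dropWhile_cons, if_neg (by simp [PySem.Chars.startswith, pvTat, List.isPrefixOf])]
    rw [← hsp, joinLines_mySplit]

-- core equivalence: the joined kept-line suffix is exactly what B computes by search + slice
theorem seg_eq_bcore : ∀ (n : Nat) (cs : List Char), cs.length ≤ n →
    pvSeg cs = (if PySem.Chars.startswith cs pvTat then cs
      else if PySem.Chars.find cs pvNlt = -1 then []
      else cs.drop ((PySem.Chars.find cs pvNlt).toNat + 1)) := by
  intro n
  induction n with
  | zero =>
    intro cs hlen
    have : cs = [] := List.eq_nil_of_length_eq_zero (by omega)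
    subst this
    simp [pvSeg, mySplit, PySem.Chars.startswith, pvTat, joinLines,
      PySem.Chars.find, PySem.Chars.find.go, pvNlt, List.isPrefixOf]
  | succ n ih =>
    intro cs hlen
    by_cases hp : PySem.Chars.startswith cs pvTat = true
    · rw [seg_of_startswith cs hp, if_pos hp]
    · rw [if_neg hp]
      by_cases hnl : '\n' ∈ cs
      · -- split off the first line: cs = l ++ '\n' :: rest
        have hdw : cs.dropWhile (fun c => c != '\n') ≠ [] := by
          intro hnil
          have heq : cs.takeWhile (fun c => c != '\n') = cs := by
            have h2 := List.takeWhile_append_dropWhile (p := fun c => c != '\n') (l := cs)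
            rw [hnil] at h2; simpa using h2
          have hmem : '\n' ∈ cs.takeWhile (fun c => c != '\n') := by rw [heq]; exact hnl
          have := List.mem_takeWhile_imp hmem
          simp at this
        have hhead : (cs.dropWhile (fun c => c != '\n')).head hdw = '\n' := by
          have := List.head_dropWhile_not (fun c => c != '\n') hdw
          simpa using this
        set l := cs.takeWhile (fun c => c != '\n') with hldef
        set rest := (cs.dropWhile (fun c => c != '\n')).tail with hrdef
        have h3 : cs.dropWhile (fun c => c != '\n') = '\n' :: rest := by
          conv_lhs => rw [← List.cons_head_tail hdw]
          rw [hhead]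
        have hcs : cs = l ++ '\n' :: rest := by
          rw [← h3]
          exact (List.takeWhile_append_dropWhile (p := fun c => c != '\n') (l := cs)).symm
        have hlnl : '\n' ∉ l := by
          intro hmem
          have := List.mem_takeWhile_imp hmem
          simp at this
        have hrlen : rest.length ≤ n := by
          have : cs.length = l.length + rest.length + 1 := by
            rw [hcs]; simp only [List.length_append, List.length_cons]; omega
          omega
        have hswl : PySem.Chars.startswith l pvTat ≠ true := by
          intro hsw
          apply hp
          simp only [PySem.Chars.startswith, List.isPrefixOf_iff_prefix] at hsw ⊢
          rw [hcs]
          exact (tat_prefix_append l rest).2 hsw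
        unfold pvSeg
        rw [hcs, mySplit_append l rest hlnl, List.dropWhile_cons,
          if_pos (by simp [hswl]), find_nlt_append l rest hlnl]
        by_cases ht : pvTat.isPrefixOf rest = true
        · rw [if_pos ht]
          have h1 : pvSeg rest = rest :=
            seg_of_startswith rest (by simpa [PySem.Chars.startswith] using ht)
          unfold pvSeg at h1
          rw [h1, if_neg (by omega), Int.toNat_natCast, List.drop_length_add_append]
          simp
        · rw [if_neg ht]
          have hihr := ih rest hrlen
          unfold pvSeg at hihr
          have hswr : PySem.Chars.startswith rest pvTat ≠ true := by
            simpa [PySem.Chars.startswith] using ht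
          rw [if_neg hswr] at hihr
          by_cases hf : PySem.Chars.find rest pvNlt = -1
          · rw [if_pos hf] at hihr
            rw [if_pos hf, hihr]
            simp
          · have hge : (0:Int) ≤ PySem.Chars.find rest pvNlt := by
              have := find_go_ge pvNlt rest 0
              rw [PySem.Chars.find] at hf ⊢; omega
            rw [if_neg hf] at hihr
            rw [if_neg hf, if_neg (by omega), hihr]
            have htn : (PySem.Chars.find rest pvNlt + (l.length : Int) + 1).toNat + 1
                = l.length + ((PySem.Chars.find rest pvNlt).toNat + 2) := by omega
            rw [htn, List.drop_length_add_append]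
            simp
      · -- no newline at all: a single line that does not start with the marker
        rw [if_pos (by
          rw [PySem.Chars.find_eq_neg_one_iff]
          intro hinf
          exact hnl (hinf.subset (by simp [pvNlt])))]
        unfold pvSeg
        rw [mySplit_no_nl cs hnl, List.dropWhile_cons, if_pos (by simp [hp])]
        simp [joinLines]

-- ===== VERDICT (by name: the statement is the Claim_ definition above) =====
theorem get_just_stack_trace_spec : Claim_equal_get_just_stack_trace := by
  intro message _
  unfold Spec_get_just_stack_trace get_just_stack_trace get_just_stack_trace_alt
  simp only [splitOn_eq_mySplit, foldl_skip]
  have hmain := seg_eq_bcore message.toList.length message.toList le_rfl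
  unfold pvSeg at hmain
  rw [hmain]
  simp only [pvTat, pvNlt]
  split
  · rfl
  · split
    · rfl
    · rfl
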